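-- pv_equiv track=rewrite | github.com/AmitAvigdor/Programming-Languages-Principles | Hw1/316178144_207465840.py | mulPrimeNumbers
-- ===== SOURCE A (Python) =====
-- def mulPrimeNumbers(number):
--     """
--     Function that will multiply only the prime numbers and return its answer
--     :param number: an integer
--     """
--     mul =1
--     flag = 0
--     while number > 0:
--         singleNum = number % 10
--         if (singleNum == 1) or (singleNum == 2) or (singleNum == 3) or (singleNum == 5) or (singleNum == 7):
--             mul = mul * singleNum
--             flag = 1
--         number = number // 10
--     if flag == 0:
--         return 0
--     return mul
-- ===== SOURCE B (Python) =====
-- def mulPrimeNumbers(number):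
--     """
--     Function that will multiply only the prime numbers and return its answer
--     :param number: an integer
--     """
--     if number <= 0:
--         return 0
--     counts = {}
--     n = number
--     while n > 0:
--         n, d = divmod(n, 10)
--         counts[d] = counts.get(d, 0) + 1
--     res = 1
--     found = False
--     for d in (1, 2, 3, 5, 7):
--         c = counts.get(d, 0)
--         if c != 0:
--             found = True
--             res *= d ** c
--     return res if found else 0
-- ===== Notes on version B (the rewrite author's own statement) =====
-- stated objective: alternative
-- what changed: B builds a digit-frequency table (dict) in one pass, then multiplies base**count over the distinct prime-ish digits, instead of A's running-multiply-with-flag scan over every digit.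
import Mathlib
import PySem

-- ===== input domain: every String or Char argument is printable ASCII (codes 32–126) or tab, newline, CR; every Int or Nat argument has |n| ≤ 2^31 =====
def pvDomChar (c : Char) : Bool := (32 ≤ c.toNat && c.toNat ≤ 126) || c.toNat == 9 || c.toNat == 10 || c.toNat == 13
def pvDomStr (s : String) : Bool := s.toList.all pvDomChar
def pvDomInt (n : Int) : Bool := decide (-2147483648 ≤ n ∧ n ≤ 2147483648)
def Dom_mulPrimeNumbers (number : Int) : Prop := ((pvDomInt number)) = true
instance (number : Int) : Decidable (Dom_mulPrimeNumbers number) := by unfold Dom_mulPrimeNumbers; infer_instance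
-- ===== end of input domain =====

-- B is an alternative implementation: it builds a digit-frequency table first, then multiplies
-- d**count over the five distinct prime-ish digits, instead of A's running-multiply-with-flag scan.

-- termination helper used by both ports' recursion on the digits of a positive number
theorem pv_div10_lt (n : Int) (h : 0 < n) : (PySem.Int.floordiv n 10).toNat < n.toNat := by
  rw [PySem.Int.floordiv_eq_ediv_of_pos (by norm_num)]
  have h1 := Int.mul_ediv_add_emod n 10
  have h2 := Int.emod_nonneg n (by norm_num : (10:Int) ≠ 0)
  have h3 := Int.emod_lt_of_pos n (by norm_num : (0:Int) < 10)
  omega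

-- ===== PORT A =====
def mulPrimeLoopA (number mul flag : Int) : Int × Int :=
  if h : number > 0 then
    let singleNum := PySem.Int.mod number 10
    if singleNum = 1 ∨ singleNum = 2 ∨ singleNum = 3 ∨ singleNum = 5 ∨ singleNum = 7 then
      mulPrimeLoopA (PySem.Int.floordiv number 10) (mul * singleNum) 1
    else
      mulPrimeLoopA (PySem.Int.floordiv number 10) mul flag
  else (mul, flag)
termination_by number.toNat
decreasing_by all_goals exact pv_div10_lt number h

def mulPrimeNumbers (number : Int) : Int :=
  let r := mulPrimeLoopA number 1 0
  if r.2 = 0 then 0 else r.1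

-- ===== PORT B =====
def mulPrimeCountB (n : Int) (counts : PySem.Dict Int Int) : PySem.Dict Int Int :=
  if h : n > 0 then
    mulPrimeCountB (PySem.Int.floordiv n 10) (counts.modify (PySem.Int.mod n 10) 0 (· + 1))
  else counts
termination_by n.toNat
decreasing_by exact pv_div10_lt n h

def mulPrimeNumbers_alt (number : Int) : Int :=
  if number ≤ 0 then 0
  else
    let counts := mulPrimeCountB number PySem.Dict.empty
    let r := [(1:Int), 2, 3, 5, 7].foldl
      (fun (st : Int × Bool) d =>
        let c := counts.getD d 0
        if c ≠ 0 then (st.1 * d ^ c.toNat, true) else st)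
      (1, false)
    if r.2 then r.1 else 0

-- ===== PRECONDITION & SPEC =====
def Spec_mulPrimeNumbers (number : Int) (out : Int) : Prop := out = mulPrimeNumbers_alt number
instance (number : Int) (out : Int) : Decidable (Spec_mulPrimeNumbers number out) := by unfold Spec_mulPrimeNumbers; infer_instance

-- ===== CLAIM (what is proved, stated in full; the proofs are below) =====
def Claim_equal_mulPrimeNumbers : Prop := ∀ (number : Int), Dom_mulPrimeNumbers number → Spec_mulPrimeNumbers number (mulPrimeNumbers number)

-- ===== LEMMAS AND PROOFS =====

-- the digit list of n (least-significant first), shared characterisation of both loops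
def pvDigits (n : Int) : List Int :=
  if h : n > 0 then PySem.Int.mod n 10 :: pvDigits (PySem.Int.floordiv n 10) else []
termination_by n.toNat
decreasing_by exact pv_div10_lt n h

def pvIsPrime (d : Int) : Bool := d = 1 ∨ d = 2 ∨ d = 3 ∨ d = 5 ∨ d = 7

-- A's loop on the digit list
def pvLoopL (l : List Int) (mul flag : Int) : Int × Int :=
  match l with
  | [] => (mul, flag)
  | d :: t => if pvIsPrime d then pvLoopL t (mul * d) 1 else pvLoopL t mul flag

theorem mulPrimeLoopA_eq_loopL (n : Int) (mul flag : Int) :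
    mulPrimeLoopA n mul flag = pvLoopL (pvDigits n) mul flag := by
  rw [mulPrimeLoopA, pvDigits]
  by_cases h : n > 0
  · rw [dif_pos h, dif_pos h]
    show (if PySem.Int.mod n 10 = 1 ∨ PySem.Int.mod n 10 = 2 ∨ PySem.Int.mod n 10 = 3 ∨
            PySem.Int.mod n 10 = 5 ∨ PySem.Int.mod n 10 = 7 then
          mulPrimeLoopA (PySem.Int.floordiv n 10) (mul * PySem.Int.mod n 10) 1
        else mulPrimeLoopA (PySem.Int.floordiv n 10) mul flag) =
        pvLoopL (PySem.Int.mod n 10 :: pvDigits (PySem.Int.floordiv n 10)) mul flag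
    rw [mulPrimeLoopA_eq_loopL (PySem.Int.floordiv n 10) (mul * PySem.Int.mod n 10) 1,
      mulPrimeLoopA_eq_loopL (PySem.Int.floordiv n 10) mul flag]
    simp [pvLoopL, pvIsPrime]
  · simp [h, pvLoopL]
termination_by n.toNat
decreasing_by all_goals exact pv_div10_lt n h

theorem mulPrimeCountB_eq_foldl (n : Int) (counts : PySem.Dict Int Int) :
    mulPrimeCountB n counts =
      (pvDigits n).foldl (fun d x => d.modify x 0 (· + 1)) counts := by
  rw [mulPrimeCountB, pvDigits]
  by_cases h : n > 0
  · rw [dif_pos h, mulPrimeCountB_eq_foldl (PySem.Int.floordiv n 10)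
      (counts.modify (PySem.Int.mod n 10) 0 (· + 1))]
    simp [h]
  · simp [h]
termination_by n.toNat
decreasing_by exact pv_div10_lt n h

theorem loopL_fst (l : List Int) : ∀ mul flag,
    (pvLoopL l mul flag).1 = mul * ((l.filter pvIsPrime).foldr (· * ·) 1) := by
  induction l with
  | nil => intro mul flag; simp [pvLoopL]
  | cons d t ih =>
    intro mul flag
    by_cases hp : pvIsPrime d
    · simp [pvLoopL, hp, ih, List.filter_cons]; ring
    · simp [pvLoopL, hp, ih]

theorem loopL_snd (l : List Int) : ∀ mul flag,
    (pvLoopL l mul flag).2 = if l.filter pvIsPrime = [] then flag else 1 := by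
  induction l with
  | nil => intro mul flag; simp [pvLoopL]
  | cons d t ih =>
    intro mul flag
    by_cases hp : pvIsPrime d
    · simp [pvLoopL, hp, ih]
    · simp [pvLoopL, hp, ih]

-- product of the prime digits = product over the five distinct primes of d^count
theorem filter_prod_eq_pow_counts (l : List Int) :
    (l.filter pvIsPrime).foldr (· * ·) 1 =
      1 ^ (l.count 1) * 2 ^ (l.count 2) * 3 ^ (l.count 3) * 5 ^ (l.count 5) * 7 ^ (l.count 7) := by
  induction l with
  | nil => simp
  | cons d t ih =>
    by_cases hp : pvIsPrime d
    · have hd : d = 1 ∨ d = 2 ∨ d = 3 ∨ d = 5 ∨ d = 7 := by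
        simpa [pvIsPrime] using hp
      rcases hd with h | h | h | h | h <;>
        (subst h; simp [List.filter_cons, List.count_cons, pvIsPrime, ih, pow_succ]; try ring)
    · have hd : ¬(d = 1 ∨ d = 2 ∨ d = 3 ∨ d = 5 ∨ d = 7) := by
        simpa [pvIsPrime] using hp
      have h1 : d ≠ 1 := fun e => hd (Or.inl e)
      have h2 : d ≠ 2 := fun e => hd (Or.inr (Or.inl e))
      have h3 : d ≠ 3 := fun e => hd (Or.inr (Or.inr (Or.inl e)))
      have h5 : d ≠ 5 := fun e => hd (Or.inr (Or.inr (Or.inr (Or.inl e))))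
      have h7 : d ≠ 7 := fun e => hd (Or.inr (Or.inr (Or.inr (Or.inr e))))
      simp [hp, ih, h1, h2, h3, h5, h7]

theorem filter_nil_iff (l : List Int) :
    l.filter pvIsPrime = [] ↔
      l.count (1:Int) = 0 ∧ l.count 2 = 0 ∧ l.count 3 = 0 ∧ l.count 5 = 0 ∧ l.count 7 = 0 := by
  simp only [List.filter_eq_nil_iff, List.count_eq_zero]
  constructor
  · intro h
    exact ⟨fun h1 => by have := h 1 h1; simp [pvIsPrime] at this,
           fun h2 => by have := h 2 h2; simp [pvIsPrime] at this,
           fun h3 => by have := h 3 h3; simp [pvIsPrime] at this,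
           fun h5 => by have := h 5 h5; simp [pvIsPrime] at this,
           fun h7 => by have := h 7 h7; simp [pvIsPrime] at this⟩
  · rintro ⟨h1, h2, h3, h5, h7⟩ a ha hpa
    have : a = 1 ∨ a = 2 ∨ a = 3 ∨ a = 5 ∨ a = 7 := by simpa [pvIsPrime] using hpa
    rcases this with h | h | h | h | h <;> subst h <;> first
      | exact h1 ha | exact h2 ha | exact h3 ha | exact h5 ha | exact h7 ha

-- ===== VERDICT (by name: the statement is the Claim_ definition above) =====
theorem mulPrimeNumbers_spec : Claim_equal_mulPrimeNumbers := by
  intro number _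
  unfold Spec_mulPrimeNumbers mulPrimeNumbers mulPrimeNumbers_alt
  by_cases hn : number ≤ 0
  · have h0 : ¬ number > 0 := by omega
    rw [mulPrimeLoopA]
    simp [h0, hn]
  · simp only [hn, if_false]
    have hcnt : ∀ d : Int,
        (mulPrimeCountB number PySem.Dict.empty).getD d 0 = ((pvDigits number).count d : Int) := by
      intro d
      rw [mulPrimeCountB_eq_foldl]
      simpa using PySem.Dict.getD_foldl_modify_add_one (pvDigits number) PySem.Dict.empty d
    rw [mulPrimeLoopA_eq_loopL]
    simp only [loopL_fst, loopL_snd, hcnt, List.foldl, filter_prod_eq_pow_counts,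
      filter_nil_iff]
    by_cases e1 : (pvDigits number).count (1:Int) = 0 <;>
      by_cases e2 : (pvDigits number).count (2:Int) = 0 <;>
      by_cases e3 : (pvDigits number).count (3:Int) = 0 <;>
      by_cases e5 : (pvDigits number).count (5:Int) = 0 <;>
      by_cases e7 : (pvDigits number).count (7:Int) = 0 <;>
      simp [e1, e2, e3, e5, e7]
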